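-- pv_equiv track=rewrite | github.com/MLDMXM2017/TOGP-ECOC | ecoc_core/OperationFuncs.py | refreshColumn
-- ===== SOURCE A (Python) =====
-- def refreshColumn(column, location, num):
--
--     if location is -1:
--         return column
--
--     if (column[location] is 1) & (num is 1):
--         column[location] = -1
--         return refreshColumn(column, location - 1, 1)
--     elif (column[location] is -1) & (num is -1):
--         column[location] = 1
--         return refreshColumn(column, location - 1, -1)
--     else:
--         column[location] += num
--         return column
-- ===== SOURCE B (Python) =====
-- def refreshColumn(column, location, num):
--     # B: find the carry stop index first, then flip the carried cells in one bulk pass (mutates column like A)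
--     if location == -1:
--         return column
--     if num == 1 or num == -1:
--         k = location
--         while k != -1 and column[k] == num:
--             k -= 1
--         for i in range(location, k, -1):
--             column[i] = -num
--         if k != -1:
--             column[k] += num
--         return column
--     column[location] += num
--     return column
-- ===== Notes on version B (the rewrite author's own statement) =====
-- stated objective: alternative
-- what changed: A propagates the carry one cell at a time by tail recursion (test, flip, recurse); B first scans once to find the index where the carry stops, then flips the whole carried segment in one bulk pass and adds the carry there.
import Mathlib
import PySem

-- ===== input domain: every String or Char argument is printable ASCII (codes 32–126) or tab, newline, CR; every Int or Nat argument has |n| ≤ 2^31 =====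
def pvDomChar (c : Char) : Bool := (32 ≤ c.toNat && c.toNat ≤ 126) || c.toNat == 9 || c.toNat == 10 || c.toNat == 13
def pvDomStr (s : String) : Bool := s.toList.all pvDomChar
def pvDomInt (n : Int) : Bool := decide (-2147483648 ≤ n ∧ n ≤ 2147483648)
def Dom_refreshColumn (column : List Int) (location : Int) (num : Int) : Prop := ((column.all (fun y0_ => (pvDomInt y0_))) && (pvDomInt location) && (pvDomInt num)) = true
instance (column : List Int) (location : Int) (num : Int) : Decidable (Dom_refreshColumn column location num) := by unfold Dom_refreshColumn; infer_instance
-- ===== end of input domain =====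

-- B replaces A's cell-by-cell carry recursion by one scan that finds the carry stop index and then one
-- bulk flip of the carried segment (objective: alternative decomposition). Both the Python A and the
-- Python B mutate `column` in place; the equivalence proved here is about the RETURN value.

-- ===== PORT A =====
-- Cited by both ports' decreasing_by: a successful index read implies the index is in range.
theorem pvGetBounds {α : Type} {xs : List α} {i : Int} {c : α}
    (h : PySem.List.pyGet? xs i = some c) : -(xs.length : Int) ≤ i ∧ i < xs.length := by
  by_contra hb
  have hn : PySem.List.pyGet? xs i = none :=
    (PySem.List.pyGet?_eq_none_iff xs i).mpr (by unfold PySem.Raise.InRange; omega)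
  rw [hn] at h
  simp at h

def refreshColumn (column : List Int) (location : Int) (num : Int) : List Int :=
  if location = -1 then column
  else
    match h : PySem.List.pyGet? column location with
    | none => column   -- Python raises IndexError here; excluded by Pre_
    | some c =>
      if c = 1 ∧ num = 1 then
        refreshColumn (PySem.List.pySetD column location (-1)) (location - 1) 1
      else if c = -1 ∧ num = -1 then
        refreshColumn (PySem.List.pySetD column location 1) (location - 1) (-1)
      else
        PySem.List.pySetD column location (c + num)
  termination_by (location + column.length + 1).toNat
  decreasing_by
  all_goals simp only [PySem.List.length_pySetD]
  all_goals have := pvGetBounds h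
  all_goals omega

-- ===== PORT B =====
-- the `while k != -1 and column[k] == num: k -= 1` loop of Source B
def findStop (column : List Int) (k : Int) (num : Int) : Int :=
  if k = -1 then k
  else
    match h : PySem.List.pyGet? column k with
    | none => k   -- Python raises IndexError here; excluded by Pre_
    | some c => if c = num then findStop column (k - 1) num else k
  termination_by (k + column.length + 1).toNat
  decreasing_by
  have := pvGetBounds h
  omega

def refreshColumn_alt (column : List Int) (location : Int) (num : Int) : List Int :=
  if location = -1 then column
  else if num = 1 ∨ num = -1 then
    let k := findStop column location num
    let col := (PySem.List.pyRange location k (-1)).foldl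
      (fun acc i => PySem.List.pySetD acc i (-num)) column
    if k ≠ -1 then PySem.List.pySetD col k (PySem.List.pyGetD col k 0 + num) else col
  else
    PySem.List.pySetD column location (PySem.List.pyGetD column location 0 + num)

-- ===== PRECONDITION & SPEC =====
-- Pre_ excludes exactly the inputs on which the Python A raises IndexError: a location outside
-- [-len, len) other than -1, or a location ≤ -2 from which the carry walk (every wrapped cell from
-- location down to -len holding the carried value num) runs off the left end of the list.
def Pre_refreshColumn (column : List Int) (location : Int) (num : Int) : Prop :=
  location = -1 ∨ (0 ≤ location ∧ location < column.length) ∨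
    (-(column.length : Int) ≤ location ∧ location ≤ -2 ∧
      ∃ j ∈ PySem.List.pyRange (-(column.length : Int)) (location + 1) 1,
        ¬((num = 1 ∨ num = -1) ∧ PySem.List.pyGetD column j 0 = num))
instance (column : List Int) (location : Int) (num : Int) : Decidable (Pre_refreshColumn column location num) := by unfold Pre_refreshColumn; infer_instance

def pvWitness_refreshColumn : List Int × Int × Int := ([1, 2], 1, 1)

def Spec_refreshColumn (column : List Int) (location : Int) (num : Int) (out : List Int) : Prop := out = refreshColumn_alt column location num
instance (column : List Int) (location : Int) (num : Int) (out : List Int) : Decidable (Spec_refreshColumn column location num out) := by unfold Spec_refreshColumn; infer_instance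

-- ===== CLAIM (what is proved, stated in full; the proofs are below) =====
def Claim_equal_refreshColumn : Prop := ∀ (column : List Int) (location : Int) (num : Int), Dom_refreshColumn column location num → Pre_refreshColumn column location num → Spec_refreshColumn column location num (refreshColumn column location num)

-- ===== LEMMAS AND PROOFS =====

theorem pvRangeNegOneNil (a b : Int) (h : a ≤ b) : PySem.List.pyRange a b (-1) = [] := by
  simp only [PySem.List.pyRange]
  norm_num
  intro h2
  omega

theorem pvRangeNegOneCons (a b : Int) (h : b < a) :
    PySem.List.pyRange a b (-1) = a :: PySem.List.pyRange (a - 1) b (-1) := by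
  simp only [PySem.List.pyRange]
  norm_num
  rw [if_pos h]
  by_cases h2 : b < a - 1
  · rw [if_pos h2]
    have hn : (a - b).toNat = (a - 1 - b).toNat + 1 := by omega
    rw [hn, List.range_succ_eq_map]
    simp only [List.map_cons, List.map_map]
    congr 1
    · norm_num
    · congr 1
      funext k
      simp
      ring
  · rw [if_neg h2]
    have hn : (a - b).toNat = 1 := by omega
    rw [hn]
    simp

-- reading strictly below a written (in-range or out-of-range) cell is unchanged, provided the two
-- indices are on the same side of 0 (the only pattern the carry walk produces)
theorem pvGetSet (xs : List Int) (i j v : Int) (hij : j < i) (hsign : 0 ≤ i → 0 ≤ j) :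
    PySem.List.pyGet? (PySem.List.pySetD xs i v) j = PySem.List.pyGet? xs j := by
  simp only [PySem.List.pySetD, PySem.List.pySet?, PySem.List.pyGet?, PySem.List.pyIdx?]
  split_ifs with h1 h2 h3 h4 h3 h4 <;> simp_all
  · rw [List.getElem_set_ne (by omega)]
  · omega
  · rw [List.getElem?_set_ne (by omega)]

theorem pvGetDSet (xs : List Int) (i j v d : Int) (hij : j < i) (hsign : 0 ≤ i → 0 ≤ j) :
    PySem.List.pyGetD (PySem.List.pySetD xs i v) j d = PySem.List.pyGetD xs j d := by
  simp [PySem.List.pyGetD, pvGetSet xs i j v hij hsign]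

theorem pvFindStopLe (column : List Int) (k num : Int) : findStop column k num ≤ k := by
  fun_induction findStop column k num <;> omega

theorem pvFindStopSet (column : List Int) (num v i : Int) :
    ∀ j, j < i → (0 ≤ i → -1 ≤ j) →
      findStop (PySem.List.pySetD column i v) j num = findStop column j num := by
  intro j
  fun_induction findStop column j num with
  | case1 =>
    intro _ _
    rw [findStop]
    simp
  | case2 k hk hget =>
    intro hji hs
    rw [findStop.eq_def, pvGetSet column i k v hji (fun h0 => by have := hs h0; omega)]
    simp only [if_neg hk]
    split <;> simp_all
  | case3 k hk hget ih =>
    intro hji hs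
    have hih := ih (by omega) (fun h0 => by have := hs h0; omega)
    rw [findStop.eq_def, pvGetSet column i k v hji (fun h0 => by have := hs h0; omega)]
    simp only [if_neg hk]
    split <;> simp_all
  | case4 k hk c hget hc =>
    intro hji hs
    rw [findStop.eq_def, pvGetSet column i k v hji (fun h0 => by have := hs h0; omega)]
    simp only [if_neg hk]
    split <;> simp_all

-- one carry step of A leaves B's result unchanged
theorem pvAltStep (column : List Int) (location num : Int)
    (hnum : num = 1 ∨ num = -1) (hne : location ≠ -1)
    (hget : PySem.List.pyGet? column location = some num) :
    refreshColumn_alt column location num =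
      refreshColumn_alt (PySem.List.pySetD column location (-num)) (location - 1) num := by
  have hb := pvGetBounds hget
  have h1 : findStop column location num = findStop column (location - 1) num := by
    rw [findStop.eq_def]
    simp only [if_neg hne]
    split <;> simp_all
  have h2 : findStop (PySem.List.pySetD column location (-num)) (location - 1) num
      = findStop column (location - 1) num :=
    pvFindStopSet column num (-num) location (location - 1) (by omega) (by omega)
  have hkle : findStop column (location - 1) num ≤ location - 1 := by
    by_cases hl1 : location - 1 = -1
    · rw [hl1, findStop]
      simp
    · exact pvFindStopLe column (location - 1) num
  simp only [refreshColumn_alt, if_neg hne, if_pos hnum, h1, h2]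
  by_cases hl1 : location - 1 = -1
  · have hk1 : findStop column (location - 1) num = -1 := by rw [hl1, findStop]; simp
    rw [hk1]
    rw [pvRangeNegOneCons location (-1) (by omega), pvRangeNegOneNil (location - 1) (-1) (by omega)]
    simp [hl1]
  · rw [if_neg hl1, pvRangeNegOneCons location (findStop column (location - 1) num) (by omega)]
    simp

theorem pvPreInRange {column : List Int} {location num : Int}
    (h : Pre_refreshColumn column location num) (hne : location ≠ -1) :
    -(column.length : Int) ≤ location ∧ location < column.length := by
  rcases h with h | h | h
  · exact absurd h hne
  · omega
  · obtain ⟨h1, h2, _⟩ := h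
    omega

-- one carry step of A preserves the precondition
theorem pvPreStep {column : List Int} {location num : Int}
    (hpre : Pre_refreshColumn column location num) (hne : location ≠ -1)
    (hget : PySem.List.pyGet? column location = some num) (hnum : num = 1 ∨ num = -1) :
    Pre_refreshColumn (PySem.List.pySetD column location (-num)) (location - 1) num := by
  have hb := pvGetBounds hget
  rcases hpre with h | h | h
  · exact absurd h hne
  · by_cases h0 : location = 0
    · left
      omega
    · right; left
      simp only [PySem.List.length_pySetD]
      omega
  · obtain ⟨hl, hl2, j, hj, hjp⟩ := h
    rw [PySem.List.mem_pyRange_one] at hj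
    have hgl : PySem.List.pyGetD column location 0 = num := by
      simp [PySem.List.pyGetD, hget]
    have hjne : j ≠ location := fun hje => hjp ⟨hnum, by rw [hje, hgl]⟩
    right; right
    simp only [PySem.List.length_pySetD]
    refine ⟨by omega, by omega, j, ?_, ?_⟩
    · rw [PySem.List.mem_pyRange_one]
      omega
    · intro hcontra
      apply hjp
      refine ⟨hnum, ?_⟩
      rw [← pvGetDSet column location j (-num) 0 (by omega) (by omega)]
      exact hcontra.2

theorem pvMain : ∀ (n : Nat) (column : List Int) (location num : Int),
    (location + column.length + 1).toNat ≤ n → Pre_refreshColumn column location num →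
    refreshColumn column location num = refreshColumn_alt column location num := by
  intro n
  induction n with
  | zero =>
    intro column location num hm hpre
    by_cases hne : location = -1
    · rw [refreshColumn, refreshColumn_alt]
      simp [hne]
    · have hb := pvPreInRange hpre hne
      omega
  | succ n ih =>
    intro column location num hm hpre
    by_cases hne : location = -1
    · rw [refreshColumn, refreshColumn_alt]
      simp [hne]
    · have hb := pvPreInRange hpre hne
      obtain ⟨c, hc⟩ : ∃ c, PySem.List.pyGet? column location = some c := by
        cases h : PySem.List.pyGet? column location with
        | none =>
          exact absurd ((PySem.List.pyGet?_eq_none_iff column location).mp h)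
            (by unfold PySem.Raise.InRange; omega)
        | some c => exact ⟨c, rfl⟩
      by_cases hcar : (num = 1 ∨ num = -1) ∧ c = num
      · obtain ⟨hnum, hceq⟩ := hcar
        rw [hceq] at hc
        have hArec : refreshColumn column location num =
            refreshColumn (PySem.List.pySetD column location (-num)) (location - 1) num := by
          rcases hnum with rfl | rfl <;>
            (rw [refreshColumn.eq_def]
             simp only [if_neg hne]
             split <;> simp_all)
        have hpre' := pvPreStep hpre hne hc hnum
        have hm' : ((location - 1) + (PySem.List.pySetD column location (-num)).length + 1).toNat ≤ n := by
          simp only [PySem.List.length_pySetD]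
          omega
        rw [hArec, ih _ _ _ hm' hpre']
        exact (pvAltStep column location num hnum hne hc).symm
      · have hb1 : ¬(c = 1 ∧ num = 1) := fun h => hcar ⟨Or.inl h.2, by omega⟩
        have hb2 : ¬(c = -1 ∧ num = -1) := fun h => hcar ⟨Or.inr h.2, by omega⟩
        have hA : refreshColumn column location num =
            PySem.List.pySetD column location (c + num) := by
          rw [refreshColumn.eq_def]
          simp only [if_neg hne]
          split
          · simp_all
          · rename_i c' heq
            obtain rfl : c' = c := Option.some.inj (hc.symm.trans heq).symm
            rw [if_neg hb1, if_neg hb2]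
        by_cases hnum : num = 1 ∨ num = -1
        · have hcne : c ≠ num := fun he => hcar ⟨hnum, he⟩
          have hk : findStop column location num = location := by
            rw [findStop.eq_def]
            simp only [if_neg hne]
            split <;> simp_all
          rw [hA, refreshColumn_alt]
          simp only [if_neg hne, if_pos hnum, hk,
            pvRangeNegOneNil location location (le_refl _), List.foldl_nil, if_pos hne]
          simp [PySem.List.pyGetD, hc]
        · rw [hA, refreshColumn_alt]
          simp only [if_neg hne, if_neg hnum]
          simp [PySem.List.pyGetD, hc]

-- ===== VERDICT (by name: the statement is the Claim_ definition above) =====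
theorem refreshColumn_spec : Claim_equal_refreshColumn := by
  intro column location num _ hpre
  unfold Spec_refreshColumn
  exact pvMain (location + column.length + 1).toNat column location num (le_refl _) hpre
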